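-- pv_equiv track=rewrite | github.com/easysergey42/Tihon_rep | Dec_15/example.py | f
-- ===== SOURCE A (Python) =====
-- def f(n):
--     if n == 1:
--         return 1
--     if n > 1:
--         if n % 2 == 0:
--             return f(n // 2) + n
--         else:
--             return f(n+1)
-- ===== SOURCE B (Python) =====
-- def f(n):
--     total = 1
--     while n > 1:
--         n = (n + 1) // 2
--         total += 2 * n
--     return total
-- ===== Notes on version B (the rewrite author's own statement) =====
-- stated objective: alternative
-- what changed: Replaced the parity-branching recursion with a branch-free accumulator loop over the round-up-halving chain n -> (n+1)//2, adding 2*next each step (both an even step and an odd+even pair of A collapse into one unconditional update).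
-- outside the precondition, e.g. on f(0): A returns None, B returns 1
import Mathlib
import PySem

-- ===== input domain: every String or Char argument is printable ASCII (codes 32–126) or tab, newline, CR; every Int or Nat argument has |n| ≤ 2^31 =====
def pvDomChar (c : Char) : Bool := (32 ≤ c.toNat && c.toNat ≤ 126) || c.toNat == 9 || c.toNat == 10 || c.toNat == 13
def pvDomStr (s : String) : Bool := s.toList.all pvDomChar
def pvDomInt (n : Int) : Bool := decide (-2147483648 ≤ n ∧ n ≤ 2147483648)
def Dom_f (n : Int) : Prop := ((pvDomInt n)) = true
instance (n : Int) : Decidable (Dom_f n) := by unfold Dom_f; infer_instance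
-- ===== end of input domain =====

-- B replaces A's parity-branching recursion by a branch-free accumulator loop over the chain n -> (n+1)//2
-- (alternative decomposition, same cost). Each port carries a Nat fuel only as a totality guard, proved never to run out.

-- ===== PORT A =====
def goA (fuel : Nat) (n : Int) : Int :=
  match fuel with
  | 0 => 0  -- never reached with the fuel f supplies (proved via fMeasure below)
  | fuel + 1 =>
    if n = 1 then 1
    else if n > 1 then
      if PySem.Int.mod n 2 = 0 then goA fuel (PySem.Int.floordiv n 2) + n
      else goA fuel (n + 1)
    else 0  -- Python returns None here (n ≤ 0); excluded by Pre_f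

def f (n : Int) : Int := goA (4 * n + 8).toNat n

-- ===== PORT B =====
-- the while-loop of Source B: unconditional update n <- (n+1)//2, total <- total + 2*(new n)
def goB (fuel : Nat) (n total : Int) : Int :=
  match fuel with
  | 0 => total  -- never reached with the fuel f_alt supplies
  | fuel + 1 =>
    if n > 1 then
      let m := PySem.Int.floordiv (n + 1) 2
      goB fuel m (total + 2 * m)
    else total

def f_alt (n : Int) : Int := goB n.toNat n 1

-- ===== PRECONDITION & SPEC =====
-- Pre_ excludes n ≤ 0, on which the Python A falls off the function and returns None (not an int).
def Pre_f (n : Int) : Prop := 1 ≤ n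
instance (n : Int) : Decidable (Pre_f n) := by unfold Pre_f; infer_instance
def pvWitness_f : Int := 6

def Spec_f (n : Int) (out : Int) : Prop := out = f_alt n
instance (n : Int) (out : Int) : Decidable (Spec_f n out) := by unfold Spec_f; infer_instance

-- ===== CLAIM (what is proved, stated in full; the proofs are below) =====
def Claim_equal_f : Prop := ∀ (n : Int), Dom_f n → Pre_f n → Spec_f n (f n)

-- ===== LEMMAS AND PROOFS =====

-- the common value: g n = 1 + sum of the even numbers A visits = what B's loop accumulates
def g (n : Int) : Int :=
  if h : n ≤ 1 then 1 else 2 * ((n + 1) / 2) + g ((n + 1) / 2)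
termination_by n.toNat
decreasing_by omega

theorem g_le (n : Int) (h : n ≤ 1) : g n = 1 := by rw [g, dif_pos h]

theorem g_gt (n : Int) (h : n > 1) : g n = 2 * ((n + 1) / 2) + g ((n + 1) / 2) := by
  rw [g, dif_neg (by omega)]

theorem pymod_two (n : Int) : PySem.Int.mod n 2 = n % 2 := PySem.Int.mod_eq_emod_of_pos (by omega)

theorem pydiv_two (n : Int) : PySem.Int.floordiv n 2 = n / 2 := PySem.Int.floordiv_eq_ediv_of_pos (by omega)

-- measure for A's recursion: halving an even n, or bumping an odd n to even, strictly decreases it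
def fMeasure (n : Int) : Nat := if n ≤ 1 then 0 else if n % 2 = 0 then (2 * n).toNat else (2 * n + 3).toNat

theorem fMeasure_half (n : Int) (h1 : n > 1) (h2 : n % 2 = 0) : fMeasure (n / 2) < fMeasure n := by
  unfold fMeasure; split_ifs <;> omega

theorem fMeasure_succ (n : Int) (h1 : n > 1) (h2 : ¬ n % 2 = 0) : fMeasure (n + 1) < fMeasure n := by
  unfold fMeasure; split_ifs <;> omega

theorem fMeasure_lt_fuel (n : Int) (h : 1 ≤ n) : fMeasure n < (4 * n + 8).toNat := by
  unfold fMeasure; split_ifs <;> omega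

theorem goA_g (fuel : Nat) : ∀ (n : Int), fMeasure n < fuel → 1 ≤ n → goA fuel n = g n := by
  induction fuel with
  | zero => intro n hf _; exact absurd hf (by omega)
  | succ fuel ih =>
    intro n hf hn
    by_cases h1 : n = 1
    · rw [goA, if_pos h1, h1, g_le 1 le_rfl]
    · have hgt : n > 1 := by omega
      rw [goA, if_neg h1, if_pos hgt]
      by_cases h2 : PySem.Int.mod n 2 = 0
      · have h2' : n % 2 = 0 := by rwa [pymod_two] at h2
        rw [if_pos h2, pydiv_two, ih (n / 2) (by have := fMeasure_half n hgt h2'; omega) (by omega),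
          g_gt n hgt]
        have hq : (n + 1) / 2 = n / 2 := by omega
        rw [hq]
        have : 2 * (n / 2) = n := by omega
        rw [this]; ring
      · have h2' : ¬ n % 2 = 0 := by rwa [pymod_two] at h2
        rw [if_neg h2, ih (n + 1) (by have := fMeasure_succ n hgt h2'; omega) (by omega),
          g_gt n hgt]
        have he : (n + 1) % 2 = 0 := by omega
        rw [g_gt (n + 1) (by omega)]
        have hq : (n + 1 + 1) / 2 = (n + 1) / 2 := by omega
        rw [hq]

theorem goB_g (fuel : Nat) : ∀ (n total : Int), n.toNat ≤ fuel →
    goB fuel n total = total + g n - 1 := by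
  induction fuel with
  | zero =>
    intro n total hf
    have hn : n ≤ 1 := by omega
    rw [goB, g_le n hn]; ring
  | succ fuel ih =>
    intro n total hf
    by_cases h1 : n > 1
    · rw [goB, if_pos h1]
      have hd : PySem.Int.floordiv (n + 1) 2 = (n + 1) / 2 := pydiv_two (n + 1)
      rw [hd, ih ((n + 1) / 2) _ (by omega), g_gt n h1]
      ring
    · rw [goB, if_neg h1, g_le n (by omega)]; ring

-- ===== VERDICT (by name: the statement is the Claim_ definition above) =====
theorem f_spec : Claim_equal_f := by
  intro n _ hpre
  unfold Spec_f f_alt f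
  rw [goB_g n.toNat n 1 le_rfl, goA_g _ n (fMeasure_lt_fuel n hpre) hpre]
  ring
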